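-- pv_equiv track=rewrite | github.com/dopefishh/praatalign | tzeltal_phonetizer.py | phonetize
-- ===== SOURCE A (Python) =====
-- trans = {'j':'x', 'w':'b', 'x':'S', '\'':'?'}
--
-- def phonetize(word, dct=None):
-- 	if dct:
-- 		return dct[word]
-- 	#Make a list
-- 	phonList = list()
-- 	#Loop through all characters
-- 	it = iter(enumerate(word))
-- 	for i, character in it:
-- 		if character == 'c' and i+1<len(word) and word[i+1]=='h':
-- 			if i+2<len(word) and word[i+2]=='\'':
-- 				next(it, None)
-- 			phonList.append('ts_j')
-- 			next(it, None)
-- 		elif character == 'k' and i+1<len(word) and word[i+1]=='\'':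
-- 			phonList.append('k')
-- 			next(it, None)
-- 		elif character == 't' and i+1<len(word) and word[i+1]=='\'':
-- 			phonList.append('t')
-- 			next(it, None)
-- 		elif character == 't' and i+1<len(word) and word[i+1]=='z':
-- 			if i+2<len(word) and word[i+2]=='\'':
-- 				next(it, None)
-- 			phonList.append('ts_j') #check character!!
-- 			next(it, None)
-- 		elif character in trans:
-- 			phonList.append(trans[character])
-- 		else:
-- 			phonList.append(character)
-- 	return phonList
-- ===== SOURCE B (Python) =====
-- trans = {'j': 'x', 'w': 'b', 'x': 'S', '\'': '?'}
--
-- PATTERNS = [("ch'", 'ts_j'), ('ch', 'ts_j'), ("k'", 'k'),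
--             ("t'", 't'), ("tz'", 'ts_j'), ('tz', 'ts_j')]
--
-- def phonetize(word, dct=None):
-- 	if dct:
-- 		return dct[word]
-- 	out = []
-- 	i = 0
-- 	n = len(word)
-- 	while i < n:
-- 		for pat, ph in PATTERNS:
-- 			if word.startswith(pat, i):
-- 				out.append(ph)
-- 				i += len(pat)
-- 				break
-- 		else:
-- 			ch = word[i]
-- 			out.append(trans.get(ch, ch))
-- 			i += 1
-- 	return out
-- ===== Notes on version B (the rewrite author's own statement) =====
-- stated objective: idiomatic
-- what changed: Replaces A's iterator-with-manual-next() branch cascade by a table-driven greedy scan: an ordered multi-character pattern list is tried at each position with word.startswith(pat, i) and the index advances by the match length.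
import Mathlib
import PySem

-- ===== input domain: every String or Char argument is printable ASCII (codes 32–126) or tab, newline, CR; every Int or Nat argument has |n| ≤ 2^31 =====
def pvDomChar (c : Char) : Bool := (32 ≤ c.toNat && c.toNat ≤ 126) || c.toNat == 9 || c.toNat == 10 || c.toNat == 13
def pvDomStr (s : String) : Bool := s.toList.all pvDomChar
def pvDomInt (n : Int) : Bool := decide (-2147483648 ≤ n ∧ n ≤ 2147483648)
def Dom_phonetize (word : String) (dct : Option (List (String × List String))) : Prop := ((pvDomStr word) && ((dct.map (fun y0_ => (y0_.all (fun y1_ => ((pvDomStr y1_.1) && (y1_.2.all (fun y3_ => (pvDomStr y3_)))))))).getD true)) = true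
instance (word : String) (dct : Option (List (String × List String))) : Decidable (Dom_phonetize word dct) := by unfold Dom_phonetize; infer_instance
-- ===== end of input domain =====

-- B replaces A's iterator/next() branch cascade by a table-driven greedy scan over a
-- prioritized multi-character pattern list (objective: idiomatic; same return value).

-- ===== PORT A =====
-- trans = {'j':'x', 'w':'b', 'x':'S', '\'':'?'}  (keys are 1-char strings; characters here)
def transA : List (Char × String) := [('j', "x"), ('w', "b"), ('x', "S"), ('\'', "?")]

-- enumerate(word) from index i (indices are the nonnegative positions, kept as Nat)
def enumFromA : Nat → List Char → List (Nat × Char)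
  | _, [] => []
  | i, c :: cs => (i, c) :: enumFromA (i + 1) cs

-- the for-loop over the iterator; each `next(it, None)` is a `.drop 1` on the remaining iterator
def aLoop (w : List Char) : List (Nat × Char) → List String
  | [] => []
  | (i, c) :: it =>
    if c = 'c' ∧ i + 1 < w.length ∧ w.getD (i + 1) ' ' = 'h' then
      if i + 2 < w.length ∧ w.getD (i + 2) ' ' = '\'' then
        "ts_j" :: aLoop w ((it.drop 1).drop 1)
      else
        "ts_j" :: aLoop w (it.drop 1)
    else if c = 'k' ∧ i + 1 < w.length ∧ w.getD (i + 1) ' ' = '\'' then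
      "k" :: aLoop w (it.drop 1)
    else if c = 't' ∧ i + 1 < w.length ∧ w.getD (i + 1) ' ' = '\'' then
      "t" :: aLoop w (it.drop 1)
    else if c = 't' ∧ i + 1 < w.length ∧ w.getD (i + 1) ' ' = 'z' then
      if i + 2 < w.length ∧ w.getD (i + 2) ' ' = '\'' then
        "ts_j" :: aLoop w ((it.drop 1).drop 1)
      else
        "ts_j" :: aLoop w (it.drop 1)
    else if c ∈ transA.map Prod.fst then
      ((List.find? (fun kv => kv.1 == c) transA).map Prod.snd).getD "" :: aLoop w it
    else
      String.ofList [c] :: aLoop w it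
  termination_by it => it.length
  decreasing_by all_goals (simp [List.length_drop]; try omega)

def phonetize (word : String) (dct : Option (List (String × List String))) : List String :=
  match dct with
  | some (kv :: tl) =>   -- `if dct:` — truthy: non-None and non-empty; dct[word] (KeyError excluded by Pre_)
      (((kv :: tl).find? (fun p => p.1 == word)).map Prod.snd).getD []
  | _ => aLoop word.toList (enumFromA 0 word.toList)

-- ===== PORT B =====
def transB : PySem.Dict Char String :=
  PySem.Dict.mk [('j', "x"), ('w', "b"), ('x', "S"), ('\'', "?")]

-- PATTERNS = [("ch'", 'ts_j'), ('ch','ts_j'), ("k'",'k'), ("t'",'t'), ("tz'",'ts_j'), ('tz','ts_j')]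
def bPatterns : List (List Char × String) :=
  [(['c', 'h', '\''], "ts_j"), (['c', 'h'], "ts_j"), (['k', '\''], "k"),
   (['t', '\''], "t"), (['t', 'z', '\''], "ts_j"), (['t', 'z'], "ts_j")]

-- the while-loop over index i; fuel makes the recursion structural (started at w.length, enough)
def bLoop (w : List Char) : Nat → Nat → List String
  | 0, _ => []
  | n + 1, i =>
    if i < w.length then
      match bPatterns.find? (fun p => p.1.isPrefixOf (w.drop i)) with  -- word.startswith(pat, i)
      | some (pat, ph) => ph :: bLoop w n (i + pat.length)
      | none =>
          let c := w.getD i ' '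
          PySem.Dict.getD transB c (String.ofList [c]) :: bLoop w n (i + 1)
    else []

def phonetize_alt (word : String) (dct : Option (List (String × List String))) : List String :=
  match dct with
  | some d =>
      if d.isEmpty then bLoop word.toList word.toList.length 0
      else ((PySem.Dict.mk d).get? word).getD []   -- dct[word]; KeyError excluded by Pre_
  | none => bLoop word.toList word.toList.length 0

-- ===== PRECONDITION & SPEC =====
-- Pre_ excludes only the inputs where A raises KeyError: a non-empty dct without word among its keys.
def Pre_phonetize (word : String) (dct : Option (List (String × List String))) : Prop :=
  match dct with
  | none => True
  | some d => d = [] ∨ word ∈ d.map Prod.fst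
instance (word : String) (dct : Option (List (String × List String))) : Decidable (Pre_phonetize word dct) := by unfold Pre_phonetize; cases dct <;> infer_instance

def pvWitness_phonetize : String × (Option (List (String × List String))) := ("chab'tz'ik", none)

def Spec_phonetize (word : String) (dct : Option (List (String × List String))) (out : List String) : Prop := out = phonetize_alt word dct
instance (word : String) (dct : Option (List (String × List String))) (out : List String) : Decidable (Spec_phonetize word dct out) := by unfold Spec_phonetize; infer_instance

-- ===== CLAIM (what is proved, stated in full; the proofs are below) =====
def Claim_equal_phonetize : Prop := ∀ (word : String) (dct : Option (List (String × List String))), Dom_phonetize word dct → Pre_phonetize word dct → Spec_phonetize word dct (phonetize word dct)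

-- ===== LEMMAS AND PROOFS =====

lemma drop_cons_facts {w : List Char} {i : Nat} {c : Char} {rest : List Char}
    (h : w.drop i = c :: rest) :
    w.drop (i + 1) = rest ∧ i < w.length ∧ w[i]? = some c := by
  have h1 : w.drop (i + 1) = rest := by
    have := congrArg (List.drop 1) h
    simpa [List.drop_drop, Nat.add_comm] using this
  have h2 : i < w.length := by
    by_contra hn
    have : w.drop i = [] := List.drop_eq_nil_of_le (by omega)
    simp [this] at h
  have h3 : w[i]? = some c := by
    have : (w.drop i)[0]? = some c := by simp [h]
    simpa [List.getElem?_drop] using this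
  exact ⟨h1, h2, h3⟩

lemma drop_nonempty {w : List Char} {i : Nat} (hi : i < w.length) :
    ∃ c rest, w.drop i = c :: rest := by
  cases hdd : w.drop i with
  | nil => exfalso; have := congrArg List.length hdd; simp at this; omega
  | cons a l => exact ⟨a, l, rfl⟩

lemma aLoop_cons (w : List Char) (i : Nat) (c : Char) (it : List (Nat × Char)) :
    aLoop w ((i, c) :: it) =
    (if c = 'c' ∧ i + 1 < w.length ∧ w.getD (i + 1) ' ' = 'h' then
      if i + 2 < w.length ∧ w.getD (i + 2) ' ' = '\'' then
        "ts_j" :: aLoop w ((it.drop 1).drop 1)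
      else
        "ts_j" :: aLoop w (it.drop 1)
    else if c = 'k' ∧ i + 1 < w.length ∧ w.getD (i + 1) ' ' = '\'' then
      "k" :: aLoop w (it.drop 1)
    else if c = 't' ∧ i + 1 < w.length ∧ w.getD (i + 1) ' ' = '\'' then
      "t" :: aLoop w (it.drop 1)
    else if c = 't' ∧ i + 1 < w.length ∧ w.getD (i + 1) ' ' = 'z' then
      if i + 2 < w.length ∧ w.getD (i + 2) ' ' = '\'' then
        "ts_j" :: aLoop w ((it.drop 1).drop 1)
      else
        "ts_j" :: aLoop w (it.drop 1)
    else if c ∈ transA.map Prod.fst then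
      ((List.find? (fun kv => kv.1 == c) transA).map Prod.snd).getD "" :: aLoop w it
    else
      String.ofList [c] :: aLoop w it) := by
  rw [aLoop]

lemma bLoop_succ (w : List Char) (n i : Nat) :
    bLoop w (n + 1) i =
    (if i < w.length then
      match bPatterns.find? (fun p => p.1.isPrefixOf (w.drop i)) with
      | some (pat, ph) => ph :: bLoop w n (i + pat.length)
      | none =>
          let c := w.getD i ' '
          PySem.Dict.getD transB c (String.ofList [c]) :: bLoop w n (i + 1)
    else []) := rfl

lemma beqF {a b : Char} (h : ¬ b = a) : (a == b) = false :=
  beq_eq_false_iff_ne.mpr (Ne.symm h)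

lemma getE {w : List Char} {i : Nat} {c : Char} (h : w[i]? = some c) (hh : i < w.length) :
    w[i] = c := by
  have := List.getElem?_eq_getElem hh
  rw [h] at this
  exact (Option.some.injEq _ _ ▸ this).symm

lemma dict_lookup (word : String) (d : List (String × List String)) :
    (PySem.Dict.mk d).get? word = (d.find? (fun p => p.1 == word)).map Prod.snd := by
  induction d with
  | nil => simp [PySem.Dict.get?]
  | cons kv tl ih =>
    obtain ⟨k, v⟩ := kv
    rw [PySem.Dict.get?_mk_cons]
    by_cases h : (k == word) = true
    · simp [List.find?_cons, h]
    · simp only [Bool.not_eq_true] at h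
      simp [List.find?_cons, h, ih]

lemma scan_eq (w : List Char) : ∀ (n i : Nat), w.length - i ≤ n →
    aLoop w (enumFromA i (w.drop i)) = bLoop w n i := by
  intro n
  induction n with
  | zero =>
    intro i hle
    have hd : w.drop i = [] := List.drop_eq_nil_of_le (by omega)
    simp [hd, enumFromA, aLoop, bLoop]
  | succ n ih =>
    intro i hle
    by_cases hi : i < w.length
    · obtain ⟨c, rest, hd⟩ := drop_nonempty hi
      obtain ⟨hd1, -, hg0⟩ := drop_cons_facts hd
      have he0 := getE hg0 hi
      have ih1 := ih (i + 1) (by omega)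
      rw [hd1] at ih1
      cases rest with
      | nil =>
        have hi1 : ¬ (i + 1 < w.length) := by
          have := congrArg List.length hd1; simp at this; omega
        simp only [enumFromA, aLoop] at ih1
        rw [hd]; simp only [enumFromA]
        rw [aLoop_cons, bLoop_succ, if_pos hi, hd]
        by_cases t1 : c = 'j'
        · subst t1
          simp [hg0, he0, hi1, bPatterns, List.find?, List.isPrefixOf, transA, transB,
                PySem.Dict.getD, PySem.Dict.get?, aLoop, ← ih1]
        · by_cases t2 : c = 'w'
          · subst t2
            simp [hg0, he0, hi1, bPatterns, List.find?, List.isPrefixOf, transA, transB,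
                  PySem.Dict.getD, PySem.Dict.get?, aLoop, ← ih1]
          · by_cases t3 : c = 'x'
            · subst t3
              simp [hg0, he0, hi1, bPatterns, List.find?, List.isPrefixOf, transA, transB,
                    PySem.Dict.getD, PySem.Dict.get?, aLoop, ← ih1]
            · by_cases t4 : c = '\''
              · subst t4
                simp [hg0, he0, hi1, bPatterns, List.find?, List.isPrefixOf, transA, transB,
                      PySem.Dict.getD, PySem.Dict.get?, aLoop, ← ih1]
              · simp [hg0, he0, hi1, bPatterns, List.find?, List.isPrefixOf, transA, transB,
                      PySem.Dict.getD, PySem.Dict.get?, aLoop, ← ih1,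
                      t1, t2, t3, t4, beqF t1, beqF t2, beqF t3, beqF t4]
      | cons c2 rest2 =>
        obtain ⟨hd2, hi1, hg1⟩ := drop_cons_facts hd1
        have he1 := getE hg1 hi1
        have e2 : i + 1 + 1 = i + 2 := by omega
        have ih2 := ih (i + 1 + 1) (by omega)
        rw [e2, hd2] at ih2
        cases rest2 with
        | nil =>
          have hi2 : ¬ (i + 2 < w.length) := by
            have := congrArg List.length hd2; simp at this; omega
          simp only [enumFromA, aLoop] at ih2
          simp only [enumFromA] at ih1
          rw [hd]; simp only [enumFromA]
          rw [aLoop_cons, bLoop_succ, if_pos hi, hd]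
          -- two characters remain: patterns of length 3 cannot match; i+2 lookahead is out of range
          by_cases b1 : c = 'c'
          · subst b1
            by_cases b4 : c2 = 'h'
            · subst b4
              simp [hg0, he0, hi1, hi2, hg1, he1, e2, bPatterns, List.find?, List.isPrefixOf, aLoop, ← ih2]
            · simp [hg0, he0, hi1, hi2, hg1, he1, e2, b4, beqF b4, bPatterns, List.find?, List.isPrefixOf,
                    transA, transB, PySem.Dict.getD, PySem.Dict.get?, ih1]
          · by_cases b2 : c = 'k'
            · subst b2
              by_cases b5 : c2 = '\''
              · subst b5
                simp [hg0, he0, hi1, hi2, hg1, he1, e2, bPatterns, List.find?, List.isPrefixOf, aLoop, ← ih2]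
              · simp [hg0, he0, hi1, hi2, hg1, he1, e2, b5, beqF b5, bPatterns, List.find?, List.isPrefixOf,
                      transA, transB, PySem.Dict.getD, PySem.Dict.get?, ih1]
            · by_cases b3 : c = 't'
              · subst b3
                by_cases b5 : c2 = '\''
                · subst b5
                  simp [hg0, he0, hi1, hi2, hg1, he1, e2, bPatterns, List.find?, List.isPrefixOf, aLoop, ← ih2]
                · by_cases b6 : c2 = 'z'
                  · subst b6
                    simp [hg0, he0, hi1, hi2, hg1, he1, e2, b5, beqF b5, bPatterns, List.find?, List.isPrefixOf, aLoop, ← ih2]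
                  · simp [hg0, he0, hi1, hi2, hg1, he1, e2, b5, beqF b5, b6, beqF b6, bPatterns, List.find?,
                          List.isPrefixOf, transA, transB, PySem.Dict.getD, PySem.Dict.get?, ih1]
              · by_cases t1 : c = 'j'
                · subst t1
                  simp [hg0, he0, hi1, hi2, hg1, he1, e2, bPatterns, List.find?, List.isPrefixOf,
                        transA, transB, PySem.Dict.getD, PySem.Dict.get?, ih1]
                · by_cases t2 : c = 'w'
                  · subst t2
                    simp [hg0, he0, hi1, hi2, hg1, he1, e2, bPatterns, List.find?, List.isPrefixOf,
                          transA, transB, PySem.Dict.getD, PySem.Dict.get?, ih1]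
                  · by_cases t3 : c = 'x'
                    · subst t3
                      simp [hg0, he0, hi1, hi2, hg1, he1, e2, bPatterns, List.find?, List.isPrefixOf,
                            transA, transB, PySem.Dict.getD, PySem.Dict.get?, ih1]
                    · by_cases t4 : c = '\''
                      · subst t4
                        simp [hg0, he0, hi1, hi2, hg1, he1, e2, bPatterns, List.find?, List.isPrefixOf,
                              transA, transB, PySem.Dict.getD, PySem.Dict.get?, ih1]
                      · simp [hg0, he0, hi1, hi2, hg1, he1, e2, b1, b2, b3, t1, t2, t3, t4,
                              beqF b1, beqF b2, beqF b3, beqF t1, beqF t2, beqF t3, beqF t4,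
                              bPatterns, List.find?, List.isPrefixOf,
                              transA, transB, PySem.Dict.getD, PySem.Dict.get?, ih1]
        | cons c3 rest3 =>
          obtain ⟨hd3, hi2, hg2⟩ := drop_cons_facts hd2
          have he2 := getE hg2 hi2
          have e3 : i + 1 + 1 + 1 = i + 3 := by omega
          have ih3 := ih (i + 1 + 1 + 1) (by omega)
          rw [e3, hd3] at ih3
          simp only [enumFromA] at ih1 ih2
          rw [hd]; simp only [enumFromA]
          rw [aLoop_cons, bLoop_succ, if_pos hi, hd]
          by_cases b1 : c = 'c'
          · subst b1
            by_cases b4 : c2 = 'h'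
            · subst b4
              by_cases b7 : c3 = '\''
              · subst b7
                simp [hg0, he0, hi1, hi2, hg1, he1, hg2, he2, e2, e3, bPatterns, List.find?, List.isPrefixOf, ih3]
              · simp [hg0, he0, hi1, hi2, hg1, he1, hg2, he2, e2, e3, b7, beqF b7, bPatterns, List.find?,
                      List.isPrefixOf, aLoop, ← ih2]
            · simp [hg0, he0, hi1, hi2, hg1, he1, e2, b4, beqF b4, bPatterns, List.find?, List.isPrefixOf,
                    transA, transB, PySem.Dict.getD, PySem.Dict.get?, ih1]
          · by_cases b2 : c = 'k'
            · subst b2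
              by_cases b5 : c2 = '\''
              · subst b5
                simp [hg0, he0, hi1, hi2, hg1, he1, e2, bPatterns, List.find?, List.isPrefixOf, aLoop, ← ih2]
              · simp [hg0, he0, hi1, hi2, hg1, he1, e2, b5, beqF b5, bPatterns, List.find?, List.isPrefixOf,
                      transA, transB, PySem.Dict.getD, PySem.Dict.get?, ih1]
            · by_cases b3 : c = 't'
              · subst b3
                by_cases b5 : c2 = '\''
                · subst b5
                  simp [hg0, he0, hi1, hi2, hg1, he1, e2, bPatterns, List.find?, List.isPrefixOf, aLoop, ← ih2]
                · by_cases b6 : c2 = 'z'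
                  · subst b6
                    by_cases b7 : c3 = '\''
                    · subst b7
                      simp [hg0, he0, hi1, hi2, hg1, he1, hg2, he2, e2, e3, b5, beqF b5, bPatterns, List.find?,
                            List.isPrefixOf, ih3]
                    · simp [hg0, he0, hi1, hi2, hg1, he1, hg2, he2, e2, e3, b5, beqF b5, b7, beqF b7, bPatterns,
                            List.find?, List.isPrefixOf, aLoop, ← ih2]
                  · simp [hg0, he0, hi1, hi2, hg1, he1, e2, b5, beqF b5, b6, beqF b6, bPatterns, List.find?,
                          List.isPrefixOf, transA, transB, PySem.Dict.getD, PySem.Dict.get?, ih1]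
              · by_cases t1 : c = 'j'
                · subst t1
                  simp [hg0, he0, hi1, hi2, hg1, he1, e2, bPatterns, List.find?, List.isPrefixOf,
                        transA, transB, PySem.Dict.getD, PySem.Dict.get?, ih1]
                · by_cases t2 : c = 'w'
                  · subst t2
                    simp [hg0, he0, hi1, hi2, hg1, he1, e2, bPatterns, List.find?, List.isPrefixOf,
                          transA, transB, PySem.Dict.getD, PySem.Dict.get?, ih1]
                  · by_cases t3 : c = 'x'
                    · subst t3
                      simp [hg0, he0, hi1, hi2, hg1, he1, e2, bPatterns, List.find?, List.isPrefixOf,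
                            transA, transB, PySem.Dict.getD, PySem.Dict.get?, ih1]
                    · by_cases t4 : c = '\''
                      · subst t4
                        simp [hg0, he0, hi1, hi2, hg1, he1, e2, bPatterns, List.find?, List.isPrefixOf,
                              transA, transB, PySem.Dict.getD, PySem.Dict.get?, ih1]
                      · simp [hg0, he0, hi1, hi2, hg1, he1, e2, b1, b2, b3, t1, t2, t3, t4,
                              beqF b1, beqF b2, beqF b3, beqF t1, beqF t2, beqF t3, beqF t4,
                              bPatterns, List.find?, List.isPrefixOf,
                              transA, transB, PySem.Dict.getD, PySem.Dict.get?, ih1]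
    · have hd : w.drop i = [] := List.drop_eq_nil_of_le (by omega)
      simp [hd, enumFromA, aLoop, bLoop, hi]

-- ===== VERDICT (by name: the statement is the Claim_ definition above) =====
theorem phonetize_spec : Claim_equal_phonetize := by
  intro word dct _ hpre
  unfold Spec_phonetize phonetize phonetize_alt
  have hs := scan_eq word.toList word.toList.length 0 (by omega)
  simp only [List.drop_zero] at hs
  match dct with
  | none => exact hs
  | some [] => simpa using hs
  | some (kv :: tl) => simp [dict_lookup]
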